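-- pv_equiv track=rewrite | github.com/hughcross/meta_tools | allele_functions/.ipynb_checkpoints/cigar_funcs-checkpoint.py | pus_finder
-- ===== SOURCE A (Python) =====
-- def pus_finder(return_list, ref_position): # have to add starting position in
--     cig_num = return_list[0]
--     cig_alph = return_list[1]
--     for num in range(1,len(cig_num)+1):
--         tot = sum(cig_num[:num])
--         if ref_position <= tot:
--             listnum = num - 1
--             break
--         else:
--             listnum = num # changed from pass
--     for index in range(0,listnum):
--         if cig_alph[index] == 'M':
--             ref_position == ref_position
--         elif cig_alph[index]== 'I':
--             ref_position = ref_position + cig_num[index]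
--         elif cig_alph[index] == 'D':
--             ref_position = ref_position - cig_num[index]
--         elif cig_alph[index] == 'S':
--             ref_position = ref_position + cig_num[index]
--     adj_pos = ref_position - 1
--
--     return adj_pos
-- ===== SOURCE B (Python) =====
-- def pus_finder(return_list, ref_position):
--     nums, ops = return_list
--     tot = 0
--     pos = ref_position
--     for n, op in zip(nums, ops):
--         if ref_position <= tot + n:
--             break
--         tot += n
--         if op in ('I', 'S'):
--             pos += n
--         elif op == 'D':
--             pos -= n
--     return pos - 1
-- ===== Notes on version B (the rewrite author's own statement) =====
-- stated objective: faster
-- what changed: Single fused pass over zip(nums, ops) with a running prefix sum and a running adjusted position replaces A's two loops, the first of which re-sums a growing slice on every iteration.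
import Mathlib
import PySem

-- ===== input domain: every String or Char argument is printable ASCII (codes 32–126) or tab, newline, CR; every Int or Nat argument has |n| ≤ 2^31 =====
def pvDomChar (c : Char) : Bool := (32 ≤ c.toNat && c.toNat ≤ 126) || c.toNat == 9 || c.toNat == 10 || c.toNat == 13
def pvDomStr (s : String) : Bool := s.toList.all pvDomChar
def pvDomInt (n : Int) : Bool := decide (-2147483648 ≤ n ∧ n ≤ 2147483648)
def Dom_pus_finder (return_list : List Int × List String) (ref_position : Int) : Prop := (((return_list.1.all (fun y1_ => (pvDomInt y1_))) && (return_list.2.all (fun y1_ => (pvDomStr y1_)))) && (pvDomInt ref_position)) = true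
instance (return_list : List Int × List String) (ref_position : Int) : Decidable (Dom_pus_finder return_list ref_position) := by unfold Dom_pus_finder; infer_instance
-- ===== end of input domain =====

-- B fuses A's two loops into one pass over zip(nums, ops) with a running prefix sum,
-- replacing A's per-iteration slice re-summation (objective: faster).

-- ===== PORT A =====
-- first loop: 'for num in range(1, len(cig_num)+1)', re-summing the slice cig_num[:num];
-- 'break' becomes the early return; the listnum accumulator's initial 0 is only reached
-- when the range is empty (cig_num = []), where Python raises — excluded by Pre_.
def pusSliceLoop (cig_num : List Int) (ref : Int) : List Nat → Nat → Nat
  | [], listnum => listnum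
  | num :: rest, _ =>
    if ref ≤ (cig_num.take num).sum then num - 1
    else pusSliceLoop cig_num ref rest num

-- second loop: 'for index in range(0, listnum)'; cig_alph[index]/cig_num[index] via pyGet?
-- (the getD defaults are only reached where Python raises IndexError — excluded by Pre_).
def pusAdjLoop (cig_num : List Int) (cig_alph : List String) : List Nat → Int → Int
  | [], ref => ref
  | i :: rest, ref =>
    let c := (PySem.List.pyGet? cig_alph (i : Int)).getD ""
    let nv := (PySem.List.pyGet? cig_num (i : Int)).getD 0
    pusAdjLoop cig_num cig_alph rest
      (if c = "M" then ref
       else if c = "I" then ref + nv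
       else if c = "D" then ref - nv
       else if c = "S" then ref + nv
       else ref)

def pus_finder (return_list : List Int × List String) (ref_position : Int) : Int :=
  let cig_num := return_list.1
  let cig_alph := return_list.2
  let listnum := pusSliceLoop cig_num ref_position (List.range' 1 cig_num.length) 0
  pusAdjLoop cig_num cig_alph (List.range listnum) ref_position - 1

-- ===== PORT B =====
-- one pass over zip(nums, ops): running total 'tot', adjusted position 'pos'
def pusAltLoop (ref : Int) : List (Int × String) → Int → Int → Int
  | [], _, pos => pos
  | (n, op) :: rest, tot, pos =>
    if ref ≤ tot + n then pos
    else pusAltLoop ref rest (tot + n)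
      (if op = "I" ∨ op = "S" then pos + n
       else if op = "D" then pos - n
       else pos)

def pus_finder_alt (return_list : List Int × List String) (ref_position : Int) : Int :=
  pusAltLoop ref_position (return_list.1.zip return_list.2) 0 ref_position - 1

-- ===== PRECONDITION & SPEC =====
-- Pre_ excludes exactly the inputs where Python A raises: an empty cig_num list
-- (UnboundLocalError: listnum is never assigned) and inputs whose second loop reaches an
-- index outside cig_alph (IndexError) — i.e. it requires every index k the second loop
-- visits (all slice sums up to position k are still below ref_position) to be inside cig_alph.
def Pre_pus_finder (return_list : List Int × List String) (ref_position : Int) : Prop :=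
  return_list.1 ≠ [] ∧
  ∀ k < return_list.1.length,
    (∀ j ≤ k, (return_list.1.take (j+1)).sum < ref_position) → k < return_list.2.length
instance (return_list : List Int × List String) (ref_position : Int) : Decidable (Pre_pus_finder return_list ref_position) := by unfold Pre_pus_finder; infer_instance
def pvWitness_pus_finder : (List Int × List String) × Int := (([2, 3], ["M", "I"]), 10)

def Spec_pus_finder (return_list : List Int × List String) (ref_position : Int) (out : Int) : Prop := out = pus_finder_alt return_list ref_position
instance (return_list : List Int × List String) (ref_position : Int) (out : Int) : Decidable (Spec_pus_finder return_list ref_position out) := by unfold Spec_pus_finder; infer_instance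

-- ===== CLAIM (what is proved, stated in full; the proofs are below) =====
def Claim_equal_pus_finder : Prop := ∀ (return_list : List Int × List String) (ref_position : Int), Dom_pus_finder return_list ref_position → Pre_pus_finder return_list ref_position → Spec_pus_finder return_list ref_position (pus_finder return_list ref_position)

-- ===== LEMMAS AND PROOFS =====

-- break count: how many leading elements have all their prefix sums (shifted by tot) < ref;
-- this is the value A's first loop assigns to listnum.
def brkCnt (ref : Int) : List Int → Int → Nat
  | [], _ => 0
  | n :: rest, tot => if ref ≤ tot + n then 0 else 1 + brkCnt ref rest (tot + n)

theorem pusSliceLoop_eq_brkCnt (L : List Int) (ref : Int) :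
    ∀ (n s : Nat), s + n = L.length →
    pusSliceLoop L ref (List.range' (s+1) n) s
      = s + brkCnt ref (L.drop s) ((L.take s).sum) := by
  intro n
  induction n with
  | zero =>
    intro s hs
    have hd : L.drop s = [] := List.drop_eq_nil_of_le (by omega)
    simp [pusSliceLoop, hd, brkCnt]
  | succ n ih =>
    intro s hs
    have hlt : s < L.length := by omega
    have htake : (L.take (s+1)).sum = (L.take s).sum + L[s] :=
      List.sum_take_succ L s hlt
    have hdrop : L.drop s = L[s] :: L.drop (s+1) := List.drop_eq_getElem_cons hlt
    rw [List.range'_succ]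
    simp only [pusSliceLoop, hdrop, brkCnt, htake]
    split_ifs with h
    · simp
    · rw [ih (s+1) (by omega)]
      rw [htake]
      omega

theorem brkCnt_lt (L : List Int) : ∀ (ref tot : Int) (i : Nat),
    i < brkCnt ref L tot →
    i < L.length ∧ ∀ j ≤ i, tot + (L.take (j+1)).sum < ref := by
  induction L with
  | nil => intro ref tot i h; simp [brkCnt] at h
  | cons n rest ih =>
    intro ref tot i h
    simp only [brkCnt] at h
    split_ifs at h with hbr
    · omega
    · rw [not_le] at hbr
      cases i with
      | zero =>
        refine ⟨by simp, ?_⟩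
        intro j hj
        interval_cases j
        simpa using hbr
      | succ i' =>
        have hi' : i' < brkCnt ref rest (tot + n) := by omega
        obtain ⟨h1, h2⟩ := ih ref (tot + n) i' hi'
        refine ⟨by simpa using Nat.succ_lt_succ h1, ?_⟩
        intro j hj
        cases j with
        | zero => simpa using hbr
        | succ j' =>
          have := h2 j' (by omega)
          simp only [List.take_succ_cons, List.sum_cons]
          omega

-- the per-element updates of A's second loop and B's loop agree
theorem step_eq (op : String) (pos n : Int) :
    (if op = "M" then pos
     else if op = "I" then pos + n
     else if op = "D" then pos - n
     else if op = "S" then pos + n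
     else pos)
    = (if op = "I" ∨ op = "S" then pos + n
       else if op = "D" then pos - n
       else pos) := by
  split_ifs <;> simp_all

theorem fused (ref : Int) (L : List Int) (A : List String) :
    ∀ (d : List Int) (s : Nat), L.drop s = d → ∀ (a : List String), A.drop s = a →
    ∀ (tot pos : Int),
    (∀ i < brkCnt ref d tot, s + i < A.length) →
    pusAltLoop ref (d.zip a) tot pos
      = pusAdjLoop L A (List.range' s (brkCnt ref d tot)) pos := by
  intro d
  induction d with
  | nil => intro s _ a _ tot pos _; simp [brkCnt, pusAltLoop, pusAdjLoop]
  | cons n d' ih =>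
    intro s hd a ha tot pos hv
    have hsL : s < L.length := by
      by_contra hc
      rw [List.drop_eq_nil_of_le (by omega)] at hd
      simp at hd
    rw [List.drop_eq_getElem_cons hsL] at hd
    obtain ⟨hLs, hLd⟩ := List.cons.inj hd
    by_cases hbr : ref ≤ tot + n
    · -- break immediately on both sides
      cases a with
      | nil => simp [pusAltLoop, brkCnt, hbr, pusAdjLoop]
      | cons op a' => simp [pusAltLoop, brkCnt, hbr, pusAdjLoop]
    · have hcnt : brkCnt ref (n :: d') tot = 1 + brkCnt ref d' (tot + n) := by
        simp [brkCnt, hbr]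
      cases a with
      | nil =>
        exfalso
        have h0 : s + 0 < A.length := hv 0 (by omega)
        have : A.length ≤ s := List.drop_eq_nil_iff.mp ha
        omega
      | cons op a' =>
        have hsA : s < A.length := by
          by_contra hc
          rw [List.drop_eq_nil_of_le (by omega)] at ha
          simp at ha
        rw [List.drop_eq_getElem_cons hsA] at ha
        obtain ⟨hAs, hAd⟩ := List.cons.inj ha
        have hgetA : (PySem.List.pyGet? A ((s : Nat) : Int)).getD "" = op := by
          rw [PySem.List.pyGet?_natCast, List.getElem?_eq_getElem hsA, hAs]
          rfl
        have hgetL : (PySem.List.pyGet? L ((s : Nat) : Int)).getD 0 = n := by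
          rw [PySem.List.pyGet?_natCast, List.getElem?_eq_getElem hsL, hLs]
          rfl
        rw [hcnt, show 1 + brkCnt ref d' (tot + n) = brkCnt ref d' (tot + n) + 1 from by omega,
            List.range'_succ]
        simp only [List.zip_cons_cons, pusAltLoop, pusAdjLoop, hgetA, hgetL, if_neg hbr]
        rw [← step_eq op pos n]
        exact ih (s+1) hLd a' hAd (tot + n) _
          (fun i hi => by have := hv (i+1) (by omega); omega)

theorem pus_finder_eq (return_list : List Int × List String) (ref_position : Int)
    (hpre : Pre_pus_finder return_list ref_position) :
    pus_finder return_list ref_position = pus_finder_alt return_list ref_position := by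
  obtain ⟨L, A⟩ := return_list
  unfold Pre_pus_finder at hpre
  dsimp only at hpre
  obtain ⟨-, hidx⟩ := hpre
  show pusAdjLoop L A (List.range (pusSliceLoop L ref_position (List.range' 1 L.length) 0)) ref_position - 1
      = pusAltLoop ref_position (L.zip A) 0 ref_position - 1
  have h1 : pusSliceLoop L ref_position (List.range' 1 L.length) 0
      = brkCnt ref_position L 0 := by
    have := pusSliceLoop_eq_brkCnt L ref_position L.length 0 (by omega)
    simpa using this
  have hv : ∀ i < brkCnt ref_position L 0, 0 + i < A.length := by
    intro i hi
    obtain ⟨hlen, hsums⟩ := brkCnt_lt L ref_position 0 i hi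
    have := hidx i hlen (fun j hj => by have := hsums j hj; omega)
    omega
  rw [h1, List.range_eq_range',
      ← fused ref_position L A L 0 (by simp) A (by simp) 0 ref_position hv]

-- ===== VERDICT (by name: the statement is the Claim_ definition above) =====
theorem pus_finder_spec : Claim_equal_pus_finder := by
  intro rl ref _ hpre
  unfold Spec_pus_finder
  exact pus_finder_eq rl ref hpre
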